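-- pv_equiv track=rewrite | github.com/muratturan19/Reporter_NVI | json_parser_fix.py | _find_last_unescaped_quote
-- ===== SOURCE A (Python) =====
-- def _find_last_unescaped_quote(segment: str) -> int | None:
--     """Return index of the last unescaped double quote in the given segment."""
--
--     idx = len(segment) - 1
--     while idx >= 0:
--         if segment[idx] == '"':
--             backslash_count = 0
--             lookback = idx - 1
--             while lookback >= 0 and segment[lookback] == '\\':
--                 backslash_count += 1
--                 lookback -= 1
--             if backslash_count % 2 == 0:
--                 return idx
--         idx -= 1
--     return None
-- ===== SOURCE B (Python) =====
-- def _find_last_unescaped_quote(segment: str) -> int | None: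
--     """Single left-to-right pass: track the length of the current run of
--     consecutive backslashes; a quote preceded by an even run is unescaped,
--     remember the last such index."""
--     last = None
--     run = 0
--     for i, ch in enumerate(segment):
--         if ch == "\\":
--             run += 1
--         else:
--             if ch == '"' and run % 2 == 0:
--                 last = i
--             run = 0
--     return last
-- ===== Notes on version B (the rewrite author's own statement) =====
-- stated objective: alternative
-- what changed: Replaces the right-to-left scan with a per-quote inner backslash-counting loop by a single left-to-right pass that maintains the current consecutive-backslash run length and records the last quote seen after an even run (worst-case O(n) vs O(n^2); measured about the same on random inputs).
import Mathlib
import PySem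

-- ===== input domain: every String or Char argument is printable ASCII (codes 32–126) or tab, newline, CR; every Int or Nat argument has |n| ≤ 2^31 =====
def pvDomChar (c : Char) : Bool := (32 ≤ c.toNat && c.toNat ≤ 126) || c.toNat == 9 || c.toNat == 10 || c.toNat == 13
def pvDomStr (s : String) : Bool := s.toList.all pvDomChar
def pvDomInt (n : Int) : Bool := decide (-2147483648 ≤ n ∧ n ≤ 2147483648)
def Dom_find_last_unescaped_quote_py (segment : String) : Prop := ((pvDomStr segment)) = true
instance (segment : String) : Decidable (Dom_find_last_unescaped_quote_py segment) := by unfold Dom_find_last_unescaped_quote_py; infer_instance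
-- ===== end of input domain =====

-- B replaces A's right-to-left scan (with a per-quote backslash-counting inner loop)
-- by a single left-to-right pass tracking the consecutive-backslash run length.

-- ===== PORT A =====
-- inner while loop of A: number of consecutive backslashes at positions i-1, i-2, …
def pvRunA (cs : List Char) : Nat → Nat
  | 0 => 0
  | j + 1 => if cs.getD j ' ' == '\\' then pvRunA cs j + 1 else 0

-- outer while loop of A: pvLoopA cs i examines indices i-1, i-2, …, 0
def pvLoopA (cs : List Char) : Nat → Option Int
  | 0 => none
  | i + 1 =>
    if cs.getD i ' ' == '"' then
      if pvRunA cs i % 2 == 0 then some (i : Int) else pvLoopA cs i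
    else pvLoopA cs i

def find_last_unescaped_quote_py (segment : String) : Option Int :=
  pvLoopA segment.toList segment.toList.length

-- ===== PORT B =====
-- B's for loop: one forward pass over the characters, state = (index, backslash run, last hit)
def pvLoopB : List Char → Nat → Nat → Option Int → Option Int
  | [], _, _, last => last
  | c :: suf, i, run, last =>
    if c == '\\' then pvLoopB suf (i + 1) (run + 1) last
    else if c == '"' && run % 2 == 0 then pvLoopB suf (i + 1) 0 (some (i : Int))
    else pvLoopB suf (i + 1) 0 last

def find_last_unescaped_quote_py_alt (segment : String) : Option Int :=
  pvLoopB segment.toList 0 0 none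

-- ===== PRECONDITION & SPEC =====
def Spec_find_last_unescaped_quote_py (segment : String) (out : Option Int) : Prop := out = find_last_unescaped_quote_py_alt segment
instance (segment : String) (out : Option Int) : Decidable (Spec_find_last_unescaped_quote_py segment out) := by unfold Spec_find_last_unescaped_quote_py; infer_instance

-- ===== CLAIM (what is proved, stated in full; the proofs are below) =====
def Claim_equal_find_last_unescaped_quote_py : Prop := ∀ (segment : String), Dom_find_last_unescaped_quote_py segment → Spec_find_last_unescaped_quote_py segment (find_last_unescaped_quote_py segment)

-- ===== LEMMAS AND PROOFS =====

-- A's loop is stable above the length of the list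
theorem pvLoopA_add (cs : List Char) (k : Nat) :
    pvLoopA cs (cs.length + k) = pvLoopA cs cs.length := by
  induction k with
  | zero => rfl
  | succ k ih =>
    have hd : cs.getD (cs.length + k) ' ' = ' ' :=
      List.getD_eq_default _ _ (Nat.le_add_right _ _)
    show pvLoopA cs ((cs.length + k) + 1) = _
    simp [pvLoopA, ih]

theorem pvLoopA_of_le (cs : List Char) (i : Nat) (h : cs.length ≤ i) :
    pvLoopA cs i = pvLoopA cs cs.length := by
  obtain ⟨k, rfl⟩ := Nat.exists_eq_add_of_le h
  exact pvLoopA_add cs k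

-- the invariant: after B has consumed the prefix of length i, its state
-- (run = A's backslash count at i, last = A's answer on indices < i) drives it to A's answer
theorem pvInv (cs : List Char) : ∀ (suf : List Char) (i : Nat), cs.drop i = suf →
    pvLoopB suf i (pvRunA cs i) (pvLoopA cs i) = pvLoopA cs cs.length := by
  intro suf
  induction suf with
  | nil =>
    intro i h
    have hle : cs.length ≤ i := by
      by_contra hlt
      exact absurd (List.drop_eq_nil_iff.mp h) (by omega)
    simp [pvLoopB, pvLoopA_of_le cs i hle]
  | cons c suf ih =>
    intro i h
    have hlt : i < cs.length := by
      by_contra hle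
      rw [List.drop_eq_nil_of_le (by omega)] at h; simp at h
    have hget : cs[i]? = some c := by
      have h0 : (List.drop i cs)[0]? = cs[i + 0]? := List.getElem?_drop
      rw [h] at h0; simpa using h0.symm
    have hdrop : cs.drop (i + 1) = suf := by
      have : (cs.drop i).drop 1 = cs.drop (i + 1) := by
        rw [List.drop_drop]
      rw [← this, h]; rfl
    have hrun : pvRunA cs (i + 1) =
        if c == '\\' then pvRunA cs i + 1 else 0 := by
      simp [pvRunA, List.getD_eq_getElem?_getD, hget]
    have hloop : pvLoopA cs (i + 1) =
        if c == '"' then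
          if pvRunA cs i % 2 == 0 then some (i : Int) else pvLoopA cs i
        else pvLoopA cs i := by
      simp [pvLoopA, List.getD_eq_getElem?_getD, hget]
    by_cases hbs : c = '\\'
    · have : pvLoopB (c :: suf) i (pvRunA cs i) (pvLoopA cs i)
          = pvLoopB suf (i + 1) (pvRunA cs i + 1) (pvLoopA cs i) := by
        simp [pvLoopB, hbs]
      rw [this, show pvRunA cs i + 1 = pvRunA cs (i + 1) by simp [hrun, hbs],
          show pvLoopA cs i = pvLoopA cs (i + 1) by simp [hloop, hbs]]
      exact ih (i + 1) hdrop
    · by_cases hq : c = '"' ∧ pvRunA cs i % 2 = 0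
      · have : pvLoopB (c :: suf) i (pvRunA cs i) (pvLoopA cs i)
            = pvLoopB suf (i + 1) 0 (some (i : Int)) := by
          simp [pvLoopB, hq.1, hq.2]
        rw [this, show (0 : Nat) = pvRunA cs (i + 1) by simp [hrun, hbs],
            show (some (i : Int)) = pvLoopA cs (i + 1) by simp [hloop, hq.1, hq.2]]
        exact ih (i + 1) hdrop
      · have hcond : ¬ (c == '"' && pvRunA cs i % 2 == 0) = true := by
          simpa using hq
        have : pvLoopB (c :: suf) i (pvRunA cs i) (pvLoopA cs i)
            = pvLoopB suf (i + 1) 0 (pvLoopA cs i) := by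
          simp [pvLoopB, hbs, hcond]
        rw [this, show (0 : Nat) = pvRunA cs (i + 1) by simp [hrun, hbs]]
        have hsame : pvLoopA cs i = pvLoopA cs (i + 1) := by
          rw [hloop]
          by_cases hc : c = '"'
          · have : ¬ pvRunA cs i % 2 = 0 := fun he => hq ⟨hc, he⟩
            simp [hc, this]
          · simp [hc]
        rw [hsame]; exact ih (i + 1) hdrop

-- ===== VERDICT (by name: the statement is the Claim_ definition above) =====
theorem find_last_unescaped_quote_py_spec : Claim_equal_find_last_unescaped_quote_py := by
  intro segment _
  show find_last_unescaped_quote_py segment = find_last_unescaped_quote_py_alt segment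
  unfold find_last_unescaped_quote_py find_last_unescaped_quote_py_alt
  have := pvInv segment.toList segment.toList 0 (by simp)
  simpa [pvRunA, pvLoopA] using this.symm
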